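-- pv_equiv track=rewrite | github.com/matfax/codebase-RAG | src/tools/graph_rag/project_chain_analysis.py | _simple_pattern_match
-- ===== SOURCE A (Python) =====
-- def _simple_pattern_match(breadcrumb: str, pattern: str) -> bool:
--     """
--     Simple pattern matching fallback implementation.
--
--     Args:
--         breadcrumb: Function breadcrumb to check
--         pattern: Pattern to match against
--
--     Returns:
--         True if the breadcrumb matches the pattern
--     """
--     # Split pattern by wildcards
--     parts = pattern.split("*")
--
--     if len(parts) == 1:
--         # No wildcards, exact match
--         return breadcrumb == pattern
--
--     # Check if breadcrumb matches all parts in sequence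
--     current_pos = 0
--
--     for i, part in enumerate(parts):
--         if not part:  # Empty part (consecutive wildcards)
--             continue
--
--         if i == 0:
--             # First part - must match at the beginning
--             if not breadcrumb.startswith(part):
--                 return False
--             current_pos = len(part)
--         elif i == len(parts) - 1:
--             # Last part - must match at the end
--             if not breadcrumb.endswith(part):
--                 return False
--             # Check if there's enough space for this part
--             if current_pos > len(breadcrumb) - len(part):
--                 return False
--         else:
--             # Middle part - must be found after current position
--             pos = breadcrumb.find(part, current_pos)
--             if pos == -1:
--                 return False
--             current_pos = pos + len(part)
--
--     return True
-- ===== SOURCE B (Python) =====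
-- def _simple_pattern_match(breadcrumb: str, pattern: str) -> bool:
--     """
--     Sparse NFA simulation: scan the breadcrumb backwards, keeping the set of
--     pattern-suffix lengths that match the part of the breadcrumb seen so far.
--     """
--     m = len(pattern)
--
--     def extend(k, states):
--         # add state k and every state reachable through consecutive '*' heads
--         states.add(k)
--         while k < m and pattern[m - k - 1] == "*":
--             k += 1
--             states.add(k)
--
--     states = set()
--     extend(0, states)
--     for c in reversed(breadcrumb):
--         new_states = set()
--         for k in states:
--             if k < m and pattern[m - k - 1] == c and pattern[m - k - 1] != "*":
--                 extend(k + 1, new_states)  # literal head consumes c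
--             if k >= 1 and pattern[m - k] == "*":
--                 extend(k, new_states)  # '*' head consumes c, state stays
--         if not new_states:
--             return False
--         states = new_states
--     return m in states
-- ===== Notes on version B (the rewrite author's own statement) =====
-- stated objective: alternative
-- what changed: Replaced the split-on-'*' segment scan (startswith / greedy find / endswith) by a sparse NFA simulation that scans the breadcrumb once, maintaining the set of pattern-suffix lengths matching the part seen so far.
import Mathlib
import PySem

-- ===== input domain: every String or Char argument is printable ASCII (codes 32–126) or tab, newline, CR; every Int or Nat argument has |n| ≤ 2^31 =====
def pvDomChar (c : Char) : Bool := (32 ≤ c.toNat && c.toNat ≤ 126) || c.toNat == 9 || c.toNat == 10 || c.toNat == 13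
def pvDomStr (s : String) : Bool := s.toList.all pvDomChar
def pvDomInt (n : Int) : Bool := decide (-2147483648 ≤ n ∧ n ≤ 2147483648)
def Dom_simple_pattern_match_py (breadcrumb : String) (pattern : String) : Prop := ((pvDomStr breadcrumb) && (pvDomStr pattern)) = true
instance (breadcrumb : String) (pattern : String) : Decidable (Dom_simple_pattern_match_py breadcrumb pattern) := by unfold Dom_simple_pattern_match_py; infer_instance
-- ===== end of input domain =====

-- B replaces A's split-on-'*' segment scan by a sparse NFA simulation over pattern-suffix states (alternative algorithm, similar cost).

-- ===== PORT A =====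
-- the 'for i, part in enumerate(parts)' loop with early returns, state current_pos (always ≥ 0, kept as Nat)
def pvAloop (s : List Char) (k : Nat) : List (Int × List Char) → Nat → Bool
  | [], _ => true
  | (i, part) :: rest, cur =>
    if part.isEmpty then pvAloop s k rest cur
    else if i == 0 then
      if !(PySem.Chars.startswith s part) then false
      else pvAloop s k rest part.length
    else if i == (k : Int) - 1 then
      if !(PySem.Chars.endswith s part) then false
      else if (cur : Int) > (s.length : Int) - (part.length : Int) then false
      else pvAloop s k rest cur
    else
      let pos := PySem.Chars.findFrom s part (cur : Int)
      if pos == -1 then false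
      else pvAloop s k rest (pos.toNat + part.length)

def simple_pattern_match_py (breadcrumb : String) (pattern : String) : Bool :=
  let parts := PySem.Chars.splitOn pattern.toList ['*']
  if parts.length == 1 then breadcrumb.toList == pattern.toList
  else pvAloop breadcrumb.toList parts.length (PySem.List.enumerate parts 0) 0

-- ===== PORT B =====
-- extend(k, states): add state k, then climb while the next suffix head is '*'
-- (python indexes pattern[m - k - 1] under a k < m guard; here q = reversed pattern, so that is q[k])
def pvExtend (q : List Char) (k : Nat) (S : PySem.Set Nat) : PySem.Set Nat :=
  let S' := S.add k
  if h : k < q.length ∧ q[k]? = some '*' then pvExtend q (k + 1) S'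
  else S'
termination_by q.length - k
decreasing_by omega

-- body of 'for k in states' (two independent tests; python's pattern[m - k] is q[k - 1])
def pvStepS (q : List Char) (c : Char) (S : PySem.Set Nat) : PySem.Set Nat :=
  S.foldl (fun NS k =>
    let NS1 := if k < q.length ∧ q[k]? = some c ∧ q[k]? ≠ some '*' then pvExtend q (k + 1) NS
               else NS
    if 1 ≤ k ∧ q[k - 1]? = some '*' then pvExtend q k NS1 else NS1) PySem.Set.empty

-- 'for c in reversed(breadcrumb)' with the early return on an empty state set
def pvLoopS (q : List Char) : List Char → PySem.Set Nat → Bool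
  | [], S => S.contains q.length
  | c :: rs, S =>
    let NS := pvStepS q c S
    if NS.isEmpty then false else pvLoopS q rs NS

def simple_pattern_match_py_alt (breadcrumb : String) (pattern : String) : Bool :=
  let q := pattern.toList.reverse
  pvLoopS q breadcrumb.toList.reverse (pvExtend q 0 PySem.Set.empty)

-- ===== PRECONDITION & SPEC =====
def Spec_simple_pattern_match_py (breadcrumb : String) (pattern : String) (out : Bool) : Prop := out = simple_pattern_match_py_alt breadcrumb pattern
instance (breadcrumb : String) (pattern : String) (out : Bool) : Decidable (Spec_simple_pattern_match_py breadcrumb pattern out) := by unfold Spec_simple_pattern_match_py; infer_instance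

-- ===== CLAIM (what is proved, stated in full; the proofs are below) =====
def Claim_equal_simple_pattern_match_py : Prop := ∀ (breadcrumb : String) (pattern : String), Dom_simple_pattern_match_py breadcrumb pattern → Spec_simple_pattern_match_py breadcrumb pattern (simple_pattern_match_py breadcrumb pattern)

-- ===== LEMMAS AND PROOFS =====

-- reference glob matcher: the common semantics both ports are reduced to
def pvM : List Char → List Char → Bool
  | [], [] => true
  | _ :: _, [] => false
  | [], c :: P => if c = '*' then pvM [] P else false
  | a :: t, c :: P => if c = '*' then (pvM (a :: t) P || pvM t (c :: P))
                      else (decide (a = c) && pvM t P)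
termination_by s P => (P.length, s.length)

theorem pvM_cons (a : Char) (t : List Char) (c : Char) (P : List Char) :
    pvM (a :: t) (c :: P) = if c = '*' then (pvM (a :: t) P || pvM t (c :: P))
                            else (decide (a = c) && pvM t P) := by
  simp only [pvM]

-- functional model of pattern.split('*')
def pvSplit : List Char → List (List Char)
  | [] => [[]]
  | c :: t =>
    if c = '*' then [] :: pvSplit t
    else match pvSplit t with
         | [] => [[c]]
         | h :: r => (c :: h) :: r

def pvJ : List (List Char) → List Char
  | [] => []
  | [w] => w
  | w :: ws => w ++ '*' :: pvJ ws

def pvConsHd (x : List Char) : List (List Char) → List (List Char)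
  | [] => [x]
  | h :: r => (x ++ h) :: r

theorem pvSplit_ne_nil (l : List Char) : pvSplit l ≠ [] := by
  cases l with
  | nil => simp [pvSplit]
  | cons c t =>
    by_cases h : c = '*' <;> simp [pvSplit, h]
    cases hr : pvSplit t <;> simp

theorem pvConsHd_nil_of_ne (xs : List (List Char)) (h : xs ≠ []) : pvConsHd [] xs = xs := by
  cases xs with
  | nil => exact absurd rfl h
  | cons a r => simp [pvConsHd]

theorem pv_go_eq (l : List Char) : ∀ (fuel : Nat) (cur : List Char) (acc : List (List Char)),
    l.length < fuel →
    PySem.Chars.splitOn.go ['*'] fuel l cur acc = acc.reverse ++ pvConsHd cur.reverse (pvSplit l) := by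
  induction l with
  | nil =>
    intro fuel cur acc hf
    match fuel, hf with
    | fuel + 1, _ => simp [PySem.Chars.splitOn.go, pvSplit, pvConsHd]
  | cons c rest ih =>
    intro fuel cur acc hf
    match fuel, hf with
    | fuel + 1, hf =>
      have hrest : rest.length < fuel := by simpa using Nat.lt_of_succ_lt_succ hf
      by_cases hc : c = '*'
      · have hpre : ['*'].isPrefixOf (c :: rest) = true := by simp [List.isPrefixOf, hc]
        rw [PySem.Chars.splitOn.go]
        simp only [hpre]
        rw [show List.drop ['*'].length (c :: rest) = rest by simp]
        rw [ih fuel [] (cur.reverse :: acc) hrest]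
        cases hrr : pvSplit rest with
        | nil => exact absurd hrr (pvSplit_ne_nil rest)
        | cons h r => simp [pvSplit, hc, pvConsHd, hrr]
      · have hpre : ['*'].isPrefixOf (c :: rest) = false := by
          simp [List.isPrefixOf]
          intro h; exact hc h.symm
        rw [PySem.Chars.splitOn.go]
        simp only [hpre, Bool.false_eq_true, if_false]
        rw [ih fuel (c :: cur) acc hrest]
        cases hr : pvSplit rest with
        | nil => exact absurd hr (pvSplit_ne_nil rest)
        | cons h r => simp [pvSplit, hc, hr, pvConsHd]

theorem pv_splitOn_eq (p : List Char) : PySem.Chars.splitOn p ['*'] = pvSplit p := by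
  unfold PySem.Chars.splitOn
  rw [pv_go_eq p (p.length + 1) [] [] (Nat.lt_succ_self _)]
  simp [pvConsHd_nil_of_ne _ (pvSplit_ne_nil p)]

theorem pvSplit_starFree (l : List Char) : ∀ w ∈ pvSplit l, '*' ∉ w := by
  induction l with
  | nil => simp [pvSplit]
  | cons c t ih =>
    intro w hw
    by_cases hc : c = '*'
    · simp only [pvSplit, if_pos hc] at hw
      rcases List.mem_cons.mp hw with h | h
      · subst h; simp
      · exact ih w h
    · simp only [pvSplit, if_neg hc] at hw
      cases hr : pvSplit t with
      | nil => exact absurd hr (pvSplit_ne_nil t)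
      | cons h r =>
        rw [hr] at hw
        rcases List.mem_cons.mp hw with h1 | h1
        · subst h1
          intro hmem
          rcases List.mem_cons.mp hmem with h2 | h2
          · exact hc h2.symm
          · exact ih h (by rw [hr]; exact List.mem_cons_self) h2
        · exact ih w (by rw [hr]; exact List.mem_cons_of_mem _ h1)

theorem pvJ_cons (w h : List Char) (r : List (List Char)) :
    pvJ (w :: h :: r) = w ++ '*' :: pvJ (h :: r) := rfl

theorem pvJ_split (l : List Char) : pvJ (pvSplit l) = l := by
  induction l with
  | nil => simp [pvSplit, pvJ]
  | cons c t ih =>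
    by_cases hc : c = '*'
    · cases hr : pvSplit t with
      | nil => exact absurd hr (pvSplit_ne_nil t)
      | cons h r =>
        rw [hr] at ih
        simp only [pvSplit, if_pos hc, hr, pvJ_cons]
        rw [ih]
        simp [hc]
    · cases hr : pvSplit t with
      | nil => exact absurd hr (pvSplit_ne_nil t)
      | cons h r =>
        rw [hr] at ih
        simp only [pvSplit, if_neg hc, hr]
        cases r with
        | nil =>
          simp only [pvJ] at ih ⊢
          rw [ih]
        | cons h2 r2 =>
          rw [pvJ_cons] at ih
          rw [pvJ_cons]
          rw [show ((c :: h) ++ '*' :: pvJ (h2 :: r2)) = c :: (h ++ '*' :: pvJ (h2 :: r2)) from rfl,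
            ih]

-- ---- pvM lemmas ----

theorem pvM_nil_pat (s : List Char) : pvM s [] = s.isEmpty := by
  cases s <;> simp [pvM]

theorem pvM_lit (w : List Char) (hw : '*' ∉ w) (r : List Char) :
    ∀ s : List Char, pvM s (w ++ r) = (decide (w <+: s) && pvM (s.drop w.length) r) := by
  induction w with
  | nil => intro s; simp
  | cons c w' ih =>
    intro s
    have hc : c ≠ '*' := fun h => hw (by simp [h])
    have hw' : '*' ∉ w' := fun h => hw (List.mem_cons_of_mem _ h)
    cases s with
    | nil =>
      have : ¬ (c :: w' <+: ([] : List Char)) := by simp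
      simp [pvM, hc, this]
    | cons a t =>
      rw [List.cons_append]
      rw [show pvM (a :: t) (c :: (w' ++ r)) = (decide (a = c) && pvM t (w' ++ r)) by
        simp [pvM, hc]]
      rw [ih hw' t]
      simp only [List.cons_prefix_cons, List.length_cons, List.drop_succ_cons]
      by_cases hac : a = c
      · subst hac; simp
      · have hca : c ≠ a := fun e => hac e.symm
        simp [hac, hca]

theorem pvM_star_iff (s P : List Char) :
    pvM s ('*' :: P) = true ↔ ∃ j, j ≤ s.length ∧ pvM (s.drop j) P = true := by
  induction s with
  | nil =>
    constructor
    · intro h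
      exact ⟨0, by simp, by simpa [pvM] using h⟩
    · rintro ⟨j, hj, h⟩
      simp at hj
      subst hj
      simpa [pvM] using h
  | cons a t ih =>
    constructor
    · intro h
      rw [show pvM (a :: t) ('*' :: P) = (pvM (a :: t) P || pvM t ('*' :: P)) by simp [pvM]] at h
      rcases Bool.or_eq_true_iff.mp h with h | h
      · exact ⟨0, by simp, by simpa using h⟩
      · rcases ih.mp h with ⟨j, hj, hM⟩
        exact ⟨j + 1, by simpa using Nat.succ_le_succ hj, by simpa using hM⟩
    · rintro ⟨j, hj, hM⟩
      rw [show pvM (a :: t) ('*' :: P) = (pvM (a :: t) P || pvM t ('*' :: P)) by simp [pvM]]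
      cases j with
      | zero => simp at hM; simp [hM]
      | succ j' =>
        have : pvM t ('*' :: P) = true := ih.mpr ⟨j', Nat.le_of_succ_le_succ hj, by simpa using hM⟩
        simp [this]

theorem pvM_star_iff' (s P : List Char) :
    pvM s ('*' :: P) = true ↔ ∃ j, pvM (s.drop j) P = true := by
  rw [pvM_star_iff]
  constructor
  · rintro ⟨j, _, h⟩; exact ⟨j, h⟩
  · rintro ⟨j, h⟩
    by_cases hj : j ≤ s.length
    · exact ⟨j, hj, h⟩
    · refine ⟨s.length, le_refl _, ?_⟩
      rw [List.drop_length]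
      rwa [List.drop_eq_nil_of_le (by omega)] at h

theorem pvM_star_mono (s P : List Char) (d : Nat)
    (h : pvM (s.drop d) ('*' :: P) = true) : pvM s ('*' :: P) = true := by
  rcases (pvM_star_iff' _ _).mp h with ⟨j, hj⟩
  rw [List.drop_drop] at hj
  exact (pvM_star_iff' _ _).mpr ⟨d + j, hj⟩

theorem pvM_star_dup (s P : List Char) :
    pvM s ('*' :: '*' :: P) = pvM s ('*' :: P) := by
  rw [Bool.eq_iff_iff, pvM_star_iff' s ('*' :: P), pvM_star_iff' s P]
  constructor
  · rintro ⟨j, hj⟩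
    rcases (pvM_star_iff' _ _).mp hj with ⟨i, hi⟩
    rw [List.drop_drop] at hi
    exact ⟨j + i, hi⟩
  · rintro ⟨j, hj⟩
    exact ⟨0, by simpa using (pvM_star_iff' _ _).mpr ⟨j, by simpa using hj⟩⟩

theorem pv_prefix_drop_empty (w u : List Char) :
    (decide (w <+: u) && (u.drop w.length).isEmpty) = true ↔ u = w := by
  constructor
  · intro h
    rcases Bool.and_eq_true_iff.mp h with ⟨h1, h2⟩
    rcases of_decide_eq_true h1 with ⟨v, hv⟩
    subst hv
    simp at h2
    simp [h2]
  · rintro rfl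
    simp

theorem pvM_star_suffix (w : List Char) (hw : '*' ∉ w) (s : List Char) :
    pvM s ('*' :: w) = true ↔ ∃ j, s.drop j = w := by
  have hP : ∀ u : List Char, pvM u w = true ↔ u = w := by
    intro u
    have hlit := pvM_lit w hw [] u
    rw [List.append_nil] at hlit
    rw [hlit, pvM_nil_pat]
    exact pv_prefix_drop_empty w u
  rw [pvM_star_iff']
  exact exists_congr fun j => hP _

theorem pvM_star_nil (s : List Char) : pvM s ['*'] = true := by
  rw [pvM_star_suffix [] (by simp) s]
  exact ⟨s.length, by simp⟩

theorem pvM_mid_char (w : List Char) (hw : '*' ∉ w) (R t : List Char) :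
    pvM t ('*' :: (w ++ '*' :: R)) = true ↔
      ∃ j, w <+: t.drop j ∧ pvM ((t.drop j).drop w.length) ('*' :: R) = true := by
  rw [pvM_star_iff']
  refine exists_congr fun j => ?_
  rw [pvM_lit w hw ('*' :: R) (t.drop j)]
  simp

theorem pv_suffix_drop (w s : List Char) (cur : Nat) (hcur : cur ≤ s.length) :
    (∃ j, (s.drop cur).drop j = w) ↔ (w <:+ s ∧ cur + w.length ≤ s.length) := by
  constructor
  · rintro ⟨j, hj⟩
    rw [List.drop_drop] at hj
    constructor
    · rw [← hj]; exact List.drop_suffix _ _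
    · have := congrArg List.length hj
      simp at this
      omega
  · rintro ⟨hsuf, hlen⟩
    rcases hsuf with ⟨v, hv⟩
    refine ⟨s.length - w.length - cur, ?_⟩
    rw [List.drop_drop]
    have hd : cur + (s.length - w.length - cur) = s.length - w.length := by omega
    rw [hd]
    have hv' : s.drop v.length = w := by rw [← hv]; simp
    have hlv : v.length = s.length - w.length := by
      have := congrArg List.length hv
      simp at this
      omega
    rwa [hlv] at hv'

-- ---- A-side loop invariant ----

theorem pv_enum_ne_zero (i : Nat) (hi : 1 ≤ i) : (((i : Int)) == (0 : Int)) = false := by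
  simp only [beq_eq_false_iff_ne, ne_eq, Int.natCast_eq_zero]
  omega

theorem pv_aloop_spec (ws : List (List Char)) :
    ∀ (s : List Char) (k i cur : Nat), ws ≠ [] → (∀ w ∈ ws, '*' ∉ w) →
    1 ≤ i → i + ws.length = k → cur ≤ s.length →
    pvAloop s k (PySem.List.enumerate ws (i : Int)) cur = pvM (s.drop cur) ('*' :: pvJ ws) := by
  induction ws with
  | nil => intro _ _ _ _ h; exact absurd rfl h
  | cons w ws' ih =>
    intro s k i cur _ hsf hi hk hcur
    rw [PySem.List.enumerate_cons]
    cases ws' with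
    | nil =>
      -- last part, i = k - 1
      have hik : (k : Int) - 1 = (i : Int) := by simp at hk; omega
      by_cases hwne : w = []
      · subst hwne
        simp only [pvAloop, List.isEmpty_nil]
        rw [PySem.List.enumerate_nil]
        simp [pvAloop, pvJ, pvM_star_nil]
      · have hwe : w.isEmpty = false := by simp [hwne]
        rw [show pvAloop s k ((( i : Int), w) :: PySem.List.enumerate [] ((i:Int) + 1)) cur =
            (if !(PySem.Chars.endswith s w) then false
             else if (cur : Int) > (s.length : Int) - (w.length : Int) then false
             else true) from by
          rw [PySem.List.enumerate_nil]
          simp only [pvAloop, hwe, Bool.false_eq_true, if_false, pv_enum_ne_zero i hi,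
            hik, beq_self_eq_true, if_true]
]
        have hsfw : '*' ∉ w := hsf w List.mem_cons_self
        rw [Bool.eq_iff_iff]
        rw [show pvJ [w] = w from rfl]
        rw [pvM_star_suffix w hsfw (s.drop cur), pv_suffix_drop w s cur hcur]
        constructor
        · intro h
          by_cases h1 : (!PySem.Chars.endswith s w) = true
          · rw [if_pos h1] at h
            exact absurd h (by simp)
          · rw [if_neg h1] at h
            by_cases h2 : (cur : Int) > (s.length : Int) - (w.length : Int)
            · rw [if_pos h2] at h
              exact absurd h (by simp)
            · refine ⟨(PySem.Chars.endswith_iff s w).mp (by simpa using h1), ?_⟩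
              push_cast at h2
              omega
        · rintro ⟨hsuf, hlen⟩
          rw [if_neg (by simp [(PySem.Chars.endswith_iff s w).mpr hsuf]),
            if_neg (by omega)]
    | cons w1 ws2 =>
      have hne2 : w1 :: ws2 ≠ [] := by simp
      have hsf' : ∀ v ∈ w1 :: ws2, '*' ∉ v := fun v hv => hsf v (List.mem_cons_of_mem _ hv)
      have hikne : (((i : Int)) == ((k : Int) - 1)) = false := by
        simp only [List.length_cons] at hk
        simp only [beq_eq_false_iff_ne, ne_eq]
        omega
      have hcast : ((i : Int) + 1) = (((i + 1 : Nat)) : Int) := by push_cast; ring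
      by_cases hwne : w = []
      · subst hwne
        simp only [pvAloop, List.isEmpty_nil]
        rw [hcast, ih s k (i + 1) cur hne2 hsf' (by omega) (by simp at hk ⊢; omega) hcur]
        rw [show pvJ ([] :: w1 :: ws2) = '*' :: pvJ (w1 :: ws2) by rw [pvJ_cons]; simp]
        rw [pvM_star_dup]
        exact if_pos (by simp)
      · have hsfw : '*' ∉ w := hsf w List.mem_cons_self
        have hwe : w.isEmpty = false := by simp [hwne]
        rw [show pvAloop s k (((i : Int), w) :: PySem.List.enumerate (w1 :: ws2) ((i:Int) + 1)) cur =
            (if (PySem.Chars.findFrom s w (cur : Int) == -1) = true then false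
             else pvAloop s k (PySem.List.enumerate (w1 :: ws2) ((i:Int) + 1))
               ((PySem.Chars.findFrom s w (cur : Int)).toNat + w.length)) from by
          simp only [pvAloop, hwe, Bool.false_eq_true, if_false, pv_enum_ne_zero i hi, hikne]]
        rw [PySem.Chars.findFrom_natCast s w cur hcur, pvJ_cons]
        by_cases hfind : PySem.Chars.find (s.drop cur) w = -1
        · rw [if_pos hfind]
          simp only [beq_self_eq_true, if_true]
          have hniin : ¬ (w <:+: s.drop cur) :=
            (PySem.Chars.find_eq_neg_one_iff (s.drop cur) w).mp hfind
          apply Bool.eq_iff_iff.mpr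
          simp only [Bool.false_eq_true, false_iff]
          rw [pvM_mid_char w hsfw (pvJ (w1 :: ws2)) (s.drop cur)]
          rintro ⟨j, hpre, _⟩
          exact hniin ((PySem.Chars.isIn_iff_infix w (s.drop cur)).mp
            ((PySem.Chars.exists_prefix_drop_iff_isIn w (s.drop cur)).mp ⟨j, hpre⟩))
        · rw [if_neg hfind]
          have hf0 : 0 ≤ PySem.Chars.find (s.drop cur) w := by
            have h := PySem.Chars.neg_one_le_find (s := s.drop cur) (sub := w)
            omega
          set f : Nat := (PySem.Chars.find (s.drop cur) w).toNat with hfdef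
          have hfval : PySem.Chars.find (s.drop cur) w = (f : Int) := by omega
          have hifne : ¬ ((((cur : Int) + PySem.Chars.find (s.drop cur) w) == -1) = true) := by
            simp only [beq_iff_eq]
            omega
          rw [if_neg hifne]
          rcases PySem.Chars.find_spec (s := s.drop cur) (sub := w) hf0 with ⟨hpre, hmin⟩
          have hflen : f + w.length ≤ s.length - cur := by
            have h1 : w.length ≤ ((s.drop cur).drop f).length := hpre.length_le
            simp at h1
            have hwne' : 1 ≤ w.length := by
              cases w with
              | nil => exact absurd rfl hwne
              | cons _ _ => simp
            omega
          have htn : ((cur : Int) + PySem.Chars.find (s.drop cur) w).toNat + w.length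
              = cur + f + w.length := by
            rw [hfval]; omega
          have hcur' : cur + f + w.length ≤ s.length := by omega
          rw [htn, hcast]
          rw [ih s k (i + 1) (cur + f + w.length) hne2 hsf' (by omega)
            (by simp at hk ⊢; omega) hcur']
          rw [Bool.eq_iff_iff]
          rw [pvM_mid_char w hsfw (pvJ (w1 :: ws2)) (s.drop cur)]
          constructor
          · intro hM
            refine ⟨f, hpre, ?_⟩
            rw [List.drop_drop, List.drop_drop]
            have hassoc : cur + (f + w.length) = cur + f + w.length := by omega
            rw [hassoc]
            exact hM
          · rintro ⟨j, hjpre, hjM⟩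
            have hjge : f ≤ j := by
              by_contra hlt2
              exact hmin j (by omega) hjpre
            rw [List.drop_drop, List.drop_drop] at hjM
            have heq : cur + (j + w.length) = cur + f + w.length + (j - f) := by omega
            rw [heq, ← List.drop_drop] at hjM
            exact pvM_star_mono _ _ _ hjM

-- ---- B-side invariant: states = suffix lengths whose pattern suffix matches ----

def pvSuf (q : List Char) (k : Nat) : List Char := (q.take k).reverse

-- every member of S is a matching suffix length for t
def pvSound (q t : List Char) (S : List Nat) : Prop :=
  ∀ j ∈ S, j ≤ q.length ∧ pvM t (pvSuf q j) = true

-- S is exactly the set of matching suffix lengths for t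
def pvGood (q t : List Char) (S : List Nat) : Prop :=
  ∀ j : Nat, j ∈ S ↔ (j ≤ q.length ∧ pvM t (pvSuf q j) = true)

-- S is closed under climbing a '*' suffix head
def pvClosed (q : List Char) (S : List Nat) : Prop :=
  ∀ x ∈ S, x < q.length → q[x]? = some '*' → (x + 1) ∈ S

theorem pvM_nil_cons (c : Char) (P : List Char) :
    pvM [] (c :: P) = if c = '*' then pvM [] P else false := by
  simp only [pvM]

theorem pvSuf_succ (q : List Char) (k : Nat) (h : k < q.length) :
    pvSuf q (k + 1) = q[k] :: pvSuf q k := by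
  unfold pvSuf
  rw [List.take_add_one]
  simp [List.getElem?_eq_getElem h]

theorem pvSuf_zero (q : List Char) : pvSuf q 0 = [] := rfl

theorem pv_not_mem_empty (j : Nat) : j ∉ (PySem.Set.empty : PySem.Set Nat) := by
  simp [PySem.Set.empty]

-- membership in pvExtend: old members plus the '*'-chain from the seed
theorem pvExtend_mem (q : List Char) : ∀ (n k : Nat) (S : PySem.Set Nat) (j : Nat),
    q.length - k ≤ n → k ≤ q.length →
    (j ∈ pvExtend q k S ↔ j ∈ S ∨
      (k ≤ j ∧ j ≤ q.length ∧ ∀ i, k ≤ i → i < j → q[i]? = some '*')) := by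
  intro n
  induction n with
  | zero =>
    intro k S j hn hk
    unfold pvExtend
    rw [dif_neg (by omega)]
    rw [PySem.Set.mem_add]
    constructor
    · rintro (h | h)
      · exact Or.inl h
      · exact Or.inr ⟨by omega, by omega, by intro i h1 h2; omega⟩
    · rintro (h | ⟨h1, h2, h3⟩)
      · exact Or.inl h
      · exact Or.inr (by omega)
  | succ n ihn =>
    intro k S j hn hk
    unfold pvExtend
    by_cases hstar : k < q.length ∧ q[k]? = some '*'
    · rw [dif_pos hstar]
      rw [ihn (k + 1) (S.add k) j (by omega) (by omega)]
      rw [PySem.Set.mem_add]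
      constructor
      · rintro ((h | h) | ⟨h1, h2, h3⟩)
        · exact Or.inl h
        · exact Or.inr ⟨by omega, by omega, by intro i hi1 hi2; omega⟩
        · refine Or.inr ⟨by omega, h2, ?_⟩
          intro i hi1 hi2
          rcases Nat.eq_or_lt_of_le hi1 with he | hl
          · rw [← he]; exact hstar.2
          · exact h3 i hl hi2
      · rintro (h | ⟨h1, h2, h3⟩)
        · exact Or.inl (Or.inl h)
        · rcases Nat.eq_or_lt_of_le h1 with he | hl
          · exact Or.inl (Or.inr he.symm)
          · exact Or.inr ⟨by omega, h2, fun i hi1 hi2 => h3 i (by omega) hi2⟩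
    · rw [dif_neg hstar]
      rw [PySem.Set.mem_add]
      constructor
      · rintro (h | h)
        · exact Or.inl h
        · exact Or.inr ⟨by omega, by omega, by intro i h1 h2; omega⟩
      · rintro (h | ⟨h1, h2, h3⟩)
        · exact Or.inl h
        · rcases Nat.eq_or_lt_of_le h1 with he | hl
          · exact Or.inr he.symm
          · exact absurd ⟨by omega, h3 k (le_refl k) hl⟩ hstar

theorem pvExtend_mem' (q : List Char) (k : Nat) (S : PySem.Set Nat) (j : Nat)
    (hk : k ≤ q.length) :
    j ∈ pvExtend q k S ↔ j ∈ S ∨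
      (k ≤ j ∧ j ≤ q.length ∧ ∀ i, k ≤ i → i < j → q[i]? = some '*') :=
  pvExtend_mem q (q.length - k) k S j (le_refl _) hk

-- climbing a chain of '*' heads preserves a match
theorem pvChain_star (q t : List Char) (k : Nat) : ∀ (j : Nat), k ≤ j →
    j ≤ q.length → (∀ i, k ≤ i → i < j → q[i]? = some '*') →
    pvM t (pvSuf q k) = true → pvM t (pvSuf q j) = true := by
  intro j hkj
  induction j, hkj using Nat.le_induction with
  | base => intro _ _ hM; exact hM
  | succ j hj ih =>
    intro hjm hchain hM
    have hjq : j < q.length := by omega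
    have hstar : q[j]? = some '*' := hchain j hj (by omega)
    have hMj : pvM t (pvSuf q j) = true :=
      ih (by omega) (fun i h1 h2 => hchain i h1 (by omega)) hM
    rw [pvSuf_succ q j hjq]
    have hqj : q[j] = '*' := by
      rw [List.getElem?_eq_getElem hjq] at hstar
      exact Option.some.inj hstar
    rw [hqj]
    exact (pvM_star_iff' t (pvSuf q j)).mpr ⟨0, by simpa using hMj⟩

theorem pvExtend_sound (q t : List Char) (k : Nat) (S : PySem.Set Nat)
    (hS : pvSound q t S) (hk : k ≤ q.length) (hM : pvM t (pvSuf q k) = true) :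
    pvSound q t (pvExtend q k S) := by
  intro j hj
  rcases (pvExtend_mem' q k S j hk).mp hj with h | ⟨h1, h2, h3⟩
  · exact hS j h
  · exact ⟨h2, pvChain_star q t k j h1 h2 h3 hM⟩

theorem pvExtend_subset (q : List Char) (k : Nat) (S : PySem.Set Nat) (j : Nat)
    (hk : k ≤ q.length) (hj : j ∈ S) : j ∈ pvExtend q k S :=
  (pvExtend_mem' q k S j hk).mpr (Or.inl hj)

theorem pvExtend_self (q : List Char) (k : Nat) (S : PySem.Set Nat) (hk : k ≤ q.length) :
    k ∈ pvExtend q k S :=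
  (pvExtend_mem' q k S k hk).mpr (Or.inr ⟨le_refl k, hk, by intro i h1 h2; omega⟩)

theorem pvExtend_closed (q : List Char) (k : Nat) (S : PySem.Set Nat)
    (hk : k ≤ q.length) (hS : pvClosed q S) : pvClosed q (pvExtend q k S) := by
  intro x hx hxq hxstar
  rcases (pvExtend_mem' q k S x hk).mp hx with h | ⟨h1, h2, h3⟩
  · exact pvExtend_subset q k S (x + 1) hk (hS x h hxq hxstar)
  · refine (pvExtend_mem' q k S (x + 1) hk).mpr (Or.inr ⟨by omega, by omega, ?_⟩)
    intro i hi1 hi2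
    rcases Nat.lt_or_ge i x with hl | hg
    · exact h3 i hi1 hl
    · have he : i = x := by omega
      rw [he]
      exact hxstar

-- the per-element body of pvStepS
def pvStepFun (q : List Char) (c : Char) (NS : PySem.Set Nat) (k : Nat) : PySem.Set Nat :=
  if 1 ≤ k ∧ q[k - 1]? = some '*' then
    pvExtend q k
      (if k < q.length ∧ q[k]? = some c ∧ q[k]? ≠ some '*' then pvExtend q (k + 1) NS else NS)
  else
    (if k < q.length ∧ q[k]? = some c ∧ q[k]? ≠ some '*' then pvExtend q (k + 1) NS else NS)

theorem pvStepS_eq_foldl (q : List Char) (c : Char) (S : PySem.Set Nat) :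
    pvStepS q c S = S.foldl (pvStepFun q c) PySem.Set.empty := rfl

theorem pvStepFun_subset (q : List Char) (c : Char) (NS : PySem.Set Nat) (k : Nat)
    (j : Nat) (hj : j ∈ NS) : j ∈ pvStepFun q c NS k := by
  unfold pvStepFun
  have h1 : j ∈ (if k < q.length ∧ q[k]? = some c ∧ q[k]? ≠ some '*' then
      pvExtend q (k + 1) NS else NS) := by
    split_ifs with h
    · exact pvExtend_subset q (k + 1) NS j (by omega) hj
    · exact hj
  by_cases h2 : 1 ≤ k ∧ q[k - 1]? = some '*'
  · rw [if_pos h2]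
    obtain ⟨hlt, -⟩ := List.getElem?_eq_some_iff.mp h2.2
    exact pvExtend_subset q k _ j (by omega) h1
  · rw [if_neg h2]
    exact h1

theorem pv_foldl_subset (q : List Char) (c : Char) : ∀ (l : List Nat) (NS : PySem.Set Nat)
    (j : Nat), j ∈ NS → j ∈ l.foldl (pvStepFun q c) NS := by
  intro l
  induction l with
  | nil => intro NS j hj; exact hj
  | cons x l ih =>
    intro NS j hj
    exact ih _ j (pvStepFun_subset q c NS x j hj)

theorem pv_foldl_attain (q : List Char) (c : Char) : ∀ (l : List Nat) (NS : PySem.Set Nat)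
    (x j : Nat), x ∈ l → (∀ X : PySem.Set Nat, j ∈ pvStepFun q c X x) →
    j ∈ l.foldl (pvStepFun q c) NS := by
  intro l
  induction l with
  | nil => intro _ _ _ hx _; exact absurd hx (List.not_mem_nil)
  | cons y l ih =>
    intro NS x j hx hstep
    rcases List.mem_cons.mp hx with he | hm
    · subst he
      exact pv_foldl_subset q c l _ j (hstep NS)
    · exact ih _ x j hm hstep

theorem pvStepFun_sound (q t : List Char) (c : Char) (k : Nat)
    (hk : k ≤ q.length) (hkM : pvM t (pvSuf q k) = true)
    (NS : PySem.Set Nat) (hNS : pvSound q (c :: t) NS) :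
    pvSound q (c :: t) (pvStepFun q c NS k) := by
  unfold pvStepFun
  have hNS1 : pvSound q (c :: t)
      (if k < q.length ∧ q[k]? = some c ∧ q[k]? ≠ some '*' then pvExtend q (k + 1) NS
       else NS) := by
    split_ifs with h
    · rcases h with ⟨hkq, hqc, hqns⟩
      refine pvExtend_sound q (c :: t) (k + 1) NS hNS (by omega) ?_
      rw [pvSuf_succ q k hkq]
      have hq : q[k] = c := by
        rw [List.getElem?_eq_getElem hkq] at hqc
        exact Option.some.inj hqc
      have hcs : c ≠ '*' := by
        intro he
        rw [List.getElem?_eq_getElem hkq, hq, he] at hqns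
        exact hqns rfl
      rw [hq, pvM_cons, if_neg hcs]
      simp [hkM]
    · exact hNS
  by_cases h2 : 1 ≤ k ∧ q[k - 1]? = some '*'
  · rw [if_pos h2]
    rcases h2 with ⟨hk1, hks⟩
    obtain ⟨hk1q, -⟩ := List.getElem?_eq_some_iff.mp hks
    refine pvExtend_sound q (c :: t) k _ hNS1 (by omega) ?_
    have hqv : q[k - 1] = '*' := by
      rw [List.getElem?_eq_getElem hk1q] at hks
      exact Option.some.inj hks
    have hsuf : pvSuf q k = '*' :: pvSuf q (k - 1) := by
      conv_lhs => rw [show k = (k - 1) + 1 from by omega]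
      rw [pvSuf_succ q (k - 1) hk1q, hqv]
    have hMk := hkM
    rw [hsuf] at hMk ⊢
    rw [pvM_cons, if_pos rfl]
    simp [hMk]
  · rw [if_neg h2]
    exact hNS1

theorem pvStepS_sound (q t : List Char) (c : Char) (S : PySem.Set Nat)
    (hG : pvGood q t S) : pvSound q (c :: t) (pvStepS q c S) := by
  rw [pvStepS_eq_foldl]
  have hrun : ∀ (l : List Nat), (∀ x ∈ l, x ∈ S) → ∀ NS, pvSound q (c :: t) NS →
      pvSound q (c :: t) (l.foldl (pvStepFun q c) NS) := by
    intro l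
    induction l with
    | nil => intro _ NS h; exact h
    | cons x l ih =>
      intro hmem NS hNS
      have hx := (hG x).mp (hmem x List.mem_cons_self)
      exact ih (fun y hy => hmem y (List.mem_cons_of_mem _ hy)) _
        (pvStepFun_sound q t c x hx.1 hx.2 NS hNS)
  exact hrun S (fun x hx => hx) PySem.Set.empty
    (fun j hj => absurd hj (pv_not_mem_empty j))

theorem pvStepFun_closed (q : List Char) (c : Char) (NS : PySem.Set Nat) (k : Nat)
    (hNS : pvClosed q NS) : pvClosed q (pvStepFun q c NS k) := by
  unfold pvStepFun
  have hNS1 : pvClosed q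
      (if k < q.length ∧ q[k]? = some c ∧ q[k]? ≠ some '*' then pvExtend q (k + 1) NS
       else NS) := by
    split_ifs with h
    · exact pvExtend_closed q (k + 1) NS (by omega) hNS
    · exact hNS
  by_cases h2 : 1 ≤ k ∧ q[k - 1]? = some '*'
  · rw [if_pos h2]
    obtain ⟨hk1q, -⟩ := List.getElem?_eq_some_iff.mp h2.2
    exact pvExtend_closed q k _ (by omega) hNS1
  · rw [if_neg h2]
    exact hNS1

theorem pv_foldl_pres (q : List Char) (c : Char) (P : PySem.Set Nat → Prop)
    (hstep : ∀ (NS : PySem.Set Nat) (k : Nat), P NS → P (pvStepFun q c NS k)) :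
    ∀ (l : List Nat) (NS : PySem.Set Nat), P NS → P (l.foldl (pvStepFun q c) NS) := by
  intro l
  induction l with
  | nil => intro NS h; exact h
  | cons x l ih => intro NS h; exact ih _ (hstep NS x h)

theorem pvStepS_closed (q : List Char) (c : Char) (S : PySem.Set Nat) :
    pvClosed q (pvStepS q c S) := by
  rw [pvStepS_eq_foldl]
  exact pv_foldl_pres q c (pvClosed q) (fun NS k h => pvStepFun_closed q c NS k h) S
    PySem.Set.empty (fun x hx _ _ => absurd hx (pv_not_mem_empty x))

theorem pvStepS_complete (q t : List Char) (c : Char) (S : PySem.Set Nat)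
    (hG : pvGood q t S) : ∀ j, j ≤ q.length → pvM (c :: t) (pvSuf q j) = true →
    j ∈ pvStepS q c S := by
  intro j
  induction j using Nat.strong_induction_on with
  | _ j ih =>
    intro hjm hM
    cases hj0 : j with
    | zero =>
      subst hj0
      rw [pvSuf_zero, pvM_nil_pat] at hM
      simp at hM
    | succ j' =>
      subst hj0
      have hj'q : j' < q.length := by omega
      rw [pvSuf_succ q j' hj'q, pvM_cons] at hM
      by_cases hstar : q[j'] = '*'
      · rw [if_pos hstar] at hM
        have hstar' : q[j']? = some '*' := by
          rw [List.getElem?_eq_getElem hj'q, hstar]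
        rcases Bool.or_eq_true_iff.mp hM with hL | hR
        · -- matched via the shorter new-row entry: closedness climbs the '*' head
          have hmem : j' ∈ pvStepS q c S := ih j' (by omega) (by omega) hL
          exact pvStepS_closed q c S j' hmem hj'q hstar'
        · -- the '*' head consumed c: seeded from j' + 1 ∈ S
          have hmemS : j' + 1 ∈ S := (hG (j' + 1)).mpr ⟨by omega, by
            rw [pvSuf_succ q j' hj'q]
            exact hR⟩
          refine pv_foldl_attain q c S PySem.Set.empty (j' + 1) (j' + 1) hmemS ?_
          intro X
          unfold pvStepFun
          rw [if_pos ⟨by omega, by simpa using hstar'⟩]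
          exact pvExtend_self q (j' + 1) _ (by omega)
      · rw [if_neg hstar] at hM
        rcases Bool.and_eq_true_iff.mp hM with ⟨hc, hMt⟩
        have hceq : c = q[j'] := of_decide_eq_true hc
        have hmemS : j' ∈ S := (hG j').mpr ⟨by omega, hMt⟩
        refine pv_foldl_attain q c S PySem.Set.empty j' (j' + 1) hmemS ?_
        intro X
        unfold pvStepFun
        have hcond : j' < q.length ∧ q[j']? = some c ∧ q[j']? ≠ some '*' := by
          refine ⟨hj'q, ?_, ?_⟩
          · rw [List.getElem?_eq_getElem hj'q, ← hceq]
          · rw [List.getElem?_eq_getElem hj'q]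
            intro he
            exact hstar (Option.some.inj he)
        rw [if_pos hcond]
        have hj1 : j' + 1 ∈ pvExtend q (j' + 1) X := pvExtend_self q (j' + 1) X (by omega)
        split_ifs with h2
        · exact pvExtend_subset q j' _ (j' + 1) (by omega) hj1
        · exact hj1

theorem pvStepS_good (q t : List Char) (c : Char) (S : PySem.Set Nat)
    (hG : pvGood q t S) : pvGood q (c :: t) (pvStepS q c S) := by
  intro j
  constructor
  · intro hj
    exact pvStepS_sound q t c S hG j hj
  · rintro ⟨h1, h2⟩
    exact pvStepS_complete q t c S hG j h1 h2

-- the empty breadcrumb matches exactly the all-'*' suffixes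
theorem pv_empty_chain (q : List Char) : ∀ j, j ≤ q.length → pvM [] (pvSuf q j) = true →
    ∀ i, i < j → q[i]? = some '*' := by
  intro j
  induction j with
  | zero => intro _ _ i hi; omega
  | succ j' ihj =>
    intro hjm h2 i hi
    have hj'q : j' < q.length := by omega
    rw [pvSuf_succ q j' hj'q, pvM_nil_cons] at h2
    by_cases hstar : q[j'] = '*'
    · rw [if_pos hstar] at h2
      rcases Nat.lt_or_ge i j' with hl | hg
      · exact ihj (by omega) h2 i hl
      · have he : i = j' := by omega
        rw [he, List.getElem?_eq_getElem hj'q, hstar]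
    · rw [if_neg hstar] at h2
      exact absurd h2 (by simp)

theorem pvInit_good (q : List Char) : pvGood q [] (pvExtend q 0 PySem.Set.empty) := by
  intro j
  rw [pvExtend_mem' q 0 PySem.Set.empty j (by omega)]
  constructor
  · rintro (h | ⟨h1, h2, h3⟩)
    · exact absurd h (pv_not_mem_empty j)
    · exact ⟨h2, pvChain_star q [] 0 j (by omega) h2 (fun i hi1 hi2 => h3 i hi1 hi2)
        (by rw [pvSuf_zero]; simp only [pvM])⟩
  · rintro ⟨h1, h2⟩
    exact Or.inr ⟨by omega, h1, fun i _ hi2 => pv_empty_chain q j h1 h2 i hi2⟩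

-- a text with no matching suffix length stays unmatched however it grows
theorem pv_dead_step (q t : List Char) (hdead : ∀ j ≤ q.length, pvM t (pvSuf q j) = false)
    (c : Char) : ∀ j, j ≤ q.length → pvM (c :: t) (pvSuf q j) = false := by
  intro j
  induction j using Nat.strong_induction_on with
  | _ j ih =>
    intro hjm
    cases hj0 : j with
    | zero =>
      rw [pvSuf_zero, pvM_nil_pat]
      rfl
    | succ j' =>
      subst hj0
      have hj'q : j' < q.length := by omega
      rw [pvSuf_succ q j' hj'q, pvM_cons]
      by_cases hstar : q[j'] = '*'
      · rw [if_pos hstar]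
        have hL : pvM (c :: t) (pvSuf q j') = false := ih j' (by omega) (by omega)
        have hR : pvM t (pvSuf q (j' + 1)) = false := hdead (j' + 1) (by omega)
        rw [pvSuf_succ q j' hj'q] at hR
        simp [hL, hR]
      · rw [if_neg hstar]
        have hMt : pvM t (pvSuf q j') = false := hdead j' (by omega)
        simp [hMt]

theorem pv_dead_ext (q : List Char) : ∀ (u t : List Char),
    (∀ j ≤ q.length, pvM t (pvSuf q j) = false) →
    ∀ j ≤ q.length, pvM (u ++ t) (pvSuf q j) = false := by
  intro u
  induction u with
  | nil => intro t h; exact h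
  | cons c u' ih =>
    intro t h j hj
    exact pv_dead_step q (u' ++ t) (ih t h) c j hj

theorem pvSuf_all (q : List Char) : pvSuf q q.length = q.reverse := by
  unfold pvSuf
  rw [List.take_length]

theorem pvLoopS_spec (q : List Char) : ∀ (rs t : List Char) (S : PySem.Set Nat),
    pvGood q t S → pvLoopS q rs S = pvM (rs.reverse ++ t) q.reverse := by
  intro rs
  induction rs with
  | nil =>
    intro t S hG
    show S.contains q.length = pvM t q.reverse
    have hc : S.contains q.length = true ↔ q.length ∈ S := List.contains_iff_mem
    rw [Bool.eq_iff_iff, hc, hG q.length, ← pvSuf_all q]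
    simp
  | cons c rs' ih =>
    intro t S hG
    have hG' := pvStepS_good q t c S hG
    show (if (pvStepS q c S).isEmpty then false else pvLoopS q rs' (pvStepS q c S)) =
      pvM ((c :: rs').reverse ++ t) q.reverse
    have harr : (c :: rs').reverse ++ t = rs'.reverse ++ (c :: t) := by simp
    rw [harr]
    by_cases hE : (pvStepS q c S).isEmpty
    · rw [if_pos hE]
      have hempty : pvStepS q c S = [] := List.isEmpty_iff.mp hE
      have hdead : ∀ j, j ≤ q.length → pvM (c :: t) (pvSuf q j) = false := by
        intro j hj
        cases hv : pvM (c :: t) (pvSuf q j)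
        · rfl
        · have hmem := (hG' j).mpr ⟨hj, hv⟩
          rw [hempty] at hmem
          exact absurd hmem (List.not_mem_nil)
      have hfin := pv_dead_ext q rs'.reverse (c :: t) hdead q.length (le_refl _)
      rw [← pvSuf_all q]
      exact hfin.symm
    · rw [if_neg hE]
      exact ih (c :: t) (pvStepS q c S) hG'

theorem pv_alt_eq_pvM (s p : String) :
    simple_pattern_match_py_alt s p = pvM s.toList p.toList := by
  show pvLoopS p.toList.reverse s.toList.reverse
      (pvExtend p.toList.reverse 0 PySem.Set.empty) = pvM s.toList p.toList
  rw [pvLoopS_spec p.toList.reverse s.toList.reverse [] (pvExtend p.toList.reverse 0 PySem.Set.empty)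
    (pvInit_good p.toList.reverse)]
  simp

-- ---- A-side top level ----

theorem pv_a_eq_pvM (s p : String) :
    simple_pattern_match_py s p = pvM s.toList p.toList := by
  have hA : simple_pattern_match_py s p =
      (if ((pvSplit p.toList).length == 1) = true then (s.toList == p.toList)
       else pvAloop s.toList (pvSplit p.toList).length
         (PySem.List.enumerate (pvSplit p.toList) 0) 0) := by
    unfold simple_pattern_match_py
    rw [pv_splitOn_eq]
  rw [hA]
  have hsf := pvSplit_starFree p.toList
  have hj := pvJ_split p.toList
  cases hp : pvSplit p.toList with
  | nil => exact absurd hp (pvSplit_ne_nil p.toList)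
  | cons w0 ps =>
    rw [hp] at hsf hj
    cases ps with
    | nil =>
      -- no wildcard: exact match
      simp only [List.length_cons, List.length_nil, Nat.reduceAdd, beq_self_eq_true, if_true]
      have hw0 : '*' ∉ w0 := hsf w0 List.mem_cons_self
      have hpw : p.toList = w0 := by simpa [pvJ] using hj.symm
      rw [hpw]
      have hlit := pvM_lit w0 hw0 [] s.toList
      rw [List.append_nil] at hlit
      rw [hlit, pvM_nil_pat, Bool.eq_iff_iff, pv_prefix_drop_empty w0 s.toList]
      simp
    | cons w1 rest =>
      have hlen : ((w0 :: w1 :: rest).length == 1) = false := by simp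
      rw [hlen]
      simp only [Bool.false_eq_true, if_false]
      rw [PySem.List.enumerate_cons]
      have hne2 : w1 :: rest ≠ [] := by simp
      have hsf' : ∀ v ∈ w1 :: rest, '*' ∉ v := fun v hv => hsf v (List.mem_cons_of_mem _ hv)
      have hpv : p.toList = pvJ (w0 :: w1 :: rest) := hj.symm
      by_cases hw0 : w0 = []
      · subst hw0
        rw [show pvAloop s.toList (([] : List Char) :: w1 :: rest).length
              (((0:Int), ([] : List Char)) :: PySem.List.enumerate (w1 :: rest) ((0:Int) + 1)) 0 =
            pvAloop s.toList (([] : List Char) :: w1 :: rest).length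
              (PySem.List.enumerate (w1 :: rest) ((0:Int) + 1)) 0 from by
          simp only [pvAloop, List.isEmpty_nil]
          exact if_pos (by simp)]
        rw [show ((0 : Int) + 1) = ((1 : Nat) : Int) by norm_num]
        rw [pv_aloop_spec (w1 :: rest) s.toList (([] : List Char) :: w1 :: rest).length 1 0 hne2 hsf'
          (le_refl 1) (by simp; omega) (by simp)]
        rw [hpv, pvJ_cons]
        simp
      · have hw0sf : '*' ∉ w0 := hsf w0 List.mem_cons_self
        have hwe : w0.isEmpty = false := by simp [hw0]
        rw [show pvAloop s.toList (w0 :: w1 :: rest).length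
              (((0:Int), w0) :: PySem.List.enumerate (w1 :: rest) ((0:Int) + 1)) 0 =
            (if !(PySem.Chars.startswith s.toList w0) then false
             else pvAloop s.toList (w0 :: w1 :: rest).length
               (PySem.List.enumerate (w1 :: rest) ((0:Int) + 1)) w0.length) from by
          simp only [pvAloop, hwe, Bool.false_eq_true, if_false, beq_self_eq_true, if_true]]
        rw [hpv, pvJ_cons, pvM_lit w0 hw0sf ('*' :: pvJ (w1 :: rest)) s.toList]
        by_cases hpre : w0 <+: s.toList
        · have hsw : PySem.Chars.startswith s.toList w0 = true :=
            (PySem.Chars.startswith_iff _ _).mpr hpre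
          rw [if_neg (by simp [hsw])]
          rw [show ((0 : Int) + 1) = ((1 : Nat) : Int) by norm_num]
          rw [pv_aloop_spec (w1 :: rest) s.toList (w0 :: w1 :: rest).length 1 w0.length hne2 hsf'
            (le_refl 1) (by simp; omega) hpre.length_le]
          simp [hpre]
        · have hsw : PySem.Chars.startswith s.toList w0 = false := by
            rw [Bool.eq_false_iff]
            intro h
            exact hpre ((PySem.Chars.startswith_iff _ _).mp h)
          rw [if_pos (by simp [hsw])]
          simp [hpre]

-- ===== VERDICT (by name: the statement is the Claim_ definition above) =====
theorem simple_pattern_match_py_spec : Claim_equal_simple_pattern_match_py := by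
  intro breadcrumb pattern _
  unfold Spec_simple_pattern_match_py
  rw [pv_a_eq_pvM, pv_alt_eq_pvM]
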